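-- pv_equiv track=rewrite | github.com/cdandre2010/MultiAgentTradingSystemV2 | src/services/indicators_original.py | _optimize_calculation_order
-- ===== SOURCE A (Python) =====
-- from typing import Dict, List, Optional, Union, Any, Callable, Tuple
--
-- def _optimize_calculation_order(indicators_config: List[Dict[str, Any]]) -> List[Dict[str, Any]]:
--     """
--     Optimize the order of indicator calculations to maximize intermediate result reuse.
--
--     Args:
--         indicators_config: List of indicator configurations
--
--     Returns:
--         Reordered list of indicator configurations
--     """
--     # Define dependency graph for indicators
--     # Some indicators can reuse calculations from others
--     dependencies = {
--         "ema": [],  # No dependencies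
--         "sma": [],  # No dependencies
--         "wma": [],  # No dependencies
--         "dema": ["ema"],  # Depends on EMA
--         "tema": ["ema"],  # Depends on EMA
--         "macd": ["ema"],  # Depends on EMA
--         "bollinger_bands": ["sma"],  # Depends on SMA
--         "rsi": [],  # No dependencies
--         "stochastic": [],  # No dependencies
--         "atr": [],  # No dependencies
--         "adx": ["atr"],  # Depends on ATR
--         "supertrend": ["atr"],  # Depends on ATR
--         "trix": ["ema"],  # Depends on EMA
--     }
--
--     # Count the number of indicators that depend on each type
--     dependency_count = {}
--     for config in indicators_config:
--         indicator_type = config.get("type", "").lower()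
--         dependency_count[indicator_type] = dependency_count.get(indicator_type, 0) + 1
--
--     # Assign priority based on dependencies
--     # Higher priority = calculate earlier
--     prioritized_config = []
--     for config in indicators_config:
--         indicator_type = config.get("type", "").lower()
--
--         # Calculate priority based on:
--         # 1. How many other indicators depend on this one
--         # 2. How many dependencies this indicator has
--         dependency_priority = sum([dependency_count.get(dep, 0) for dep in dependencies.get(indicator_type, [])])
--         priority = dependency_priority
--
--         prioritized_config.append((config, priority))
--
--     # Sort by priority (highest first)
--     prioritized_config.sort(key=lambda x: x[1], reverse=True)
--
--     # Return just the configurations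
--     return [config for config, _ in prioritized_config]
-- ===== SOURCE B (Python) =====
-- def _optimize_calculation_order(indicators_config):
--     """Reorder indicator configs by dependency-based priority.
--
--     Different algorithm: the dependency graph is inverted (dependents), scores
--     are pushed forward in one pass (+1 to every type that depends on the seen
--     type), and the final order is produced by grouping configs into priority
--     buckets and emitting the buckets by descending priority (a bucket sort),
--     instead of scoring each config by summing counts and comparison-sorting.
--     """
--     dependents = {
--         "ema": ["dema", "tema", "macd", "trix"],
--         "sma": ["bollinger_bands"],
--         "atr": ["adx", "supertrend"],
--     }
--     score = {}
--     for config in indicators_config: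
--         t = config.get("type", "").lower()
--         for d in dependents.get(t, []):
--             score[d] = score.get(d, 0) + 1
--     buckets = {}
--     for config in indicators_config:
--         p = score.get(config.get("type", "").lower(), 0)
--         buckets[p] = buckets.get(p, []) + [config]
--     result = []
--     for p in sorted(buckets, reverse=True):
--         result.extend(buckets[p])
--     return result
-- ===== Notes on version B (the rewrite author's own statement) =====
-- stated objective: alternative
-- what changed: B inverts the dependency graph: one pass pushes +1 to the score of every type depending on the seen type (no per-config summation over a counts dict), then configs are grouped into priority buckets and the buckets are concatenated in descending key order (bucket grouping replaces A's comparison sort of (config, priority) pairs).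
import Mathlib
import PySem

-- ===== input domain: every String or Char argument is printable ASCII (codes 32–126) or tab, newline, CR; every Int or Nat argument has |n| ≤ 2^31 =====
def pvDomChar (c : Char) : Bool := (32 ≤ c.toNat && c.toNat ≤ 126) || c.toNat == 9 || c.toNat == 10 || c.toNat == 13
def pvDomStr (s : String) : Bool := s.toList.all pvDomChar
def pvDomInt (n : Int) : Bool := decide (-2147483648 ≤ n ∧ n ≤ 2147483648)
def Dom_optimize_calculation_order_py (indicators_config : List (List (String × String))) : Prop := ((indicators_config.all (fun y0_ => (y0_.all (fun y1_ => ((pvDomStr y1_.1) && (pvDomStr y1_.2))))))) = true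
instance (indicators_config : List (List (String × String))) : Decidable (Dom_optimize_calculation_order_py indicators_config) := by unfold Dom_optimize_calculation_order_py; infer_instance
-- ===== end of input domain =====

-- B inverts the dependency graph (pushing +1 scores in one pass over the configs)
-- and emits the result by bucket grouping: configs are grouped by priority and the
-- buckets are concatenated in descending key order, instead of A's count-then-sum
-- scoring plus a comparison sort of (config, priority) pairs (alternative algorithm).


-- ===== PORT A =====
-- module constant of A: the literal `dependencies` dict
def pvDependencies : PySem.Dict String (List String) :=
  PySem.Dict.ofList
    [("ema", []), ("sma", []), ("wma", []),
     ("dema", ["ema"]), ("tema", ["ema"]), ("macd", ["ema"]),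
     ("bollinger_bands", ["sma"]),
     ("rsi", []), ("stochastic", []), ("atr", []),
     ("adx", ["atr"]), ("supertrend", ["atr"]), ("trix", ["ema"])]

def optimize_calculation_order_py (indicators_config : List (List (String × String))) : List (List (String × String)) :=
  -- dependency_count: for config in …: dependency_count[t] = dependency_count.get(t, 0) + 1
  let dependency_count : PySem.Dict String Int :=
    indicators_config.foldl
      (fun d config =>
        let indicator_type := PySem.Str.lower ((PySem.Dict.ofList config).getD "type" "")
        d.insert indicator_type (d.getD indicator_type 0 + 1))
      PySem.Dict.empty
  -- prioritized_config: append (config, priority) pairs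
  let prioritized_config : List (List (String × String) × Int) :=
    indicators_config.foldl
      (fun acc config =>
        let indicator_type := PySem.Str.lower ((PySem.Dict.ofList config).getD "type" "")
        let dependency_priority :=
          ((pvDependencies.getD indicator_type []).map
            (fun dep => dependency_count.getD dep 0)).sum
        acc ++ [(config, dependency_priority)])
      []
  -- prioritized_config.sort(key=lambda x: x[1], reverse=True)
  let sorted := PySem.List.sorted prioritized_config (fun x => x.2) true
  sorted.map (fun x => x.1)

-- ===== PORT B =====
-- B's inverted graph: for each base type, the types that depend on it
def pvDependents : PySem.Dict String (List String) :=
  PySem.Dict.ofList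
    [("ema", ["dema", "tema", "macd", "trix"]),
     ("sma", ["bollinger_bands"]),
     ("atr", ["adx", "supertrend"])]

def optimize_calculation_order_py_alt (indicators_config : List (List (String × String))) : List (List (String × String)) :=
  -- push pass: score[d] += 1 for every type d that depends on the seen type
  let score : PySem.Dict String Int :=
    indicators_config.foldl
      (fun s config =>
        let t := PySem.Str.lower ((PySem.Dict.ofList config).getD "type" "")
        (pvDependents.getD t []).foldl (fun s d => s.insert d (s.getD d 0 + 1)) s)
      PySem.Dict.empty
  -- bucket pass: buckets[p] = buckets.get(p, []) + [config]
  let buckets : PySem.Dict Int (List (List (String × String))) :=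
    indicators_config.foldl
      (fun b config =>
        let p := score.getD (PySem.Str.lower ((PySem.Dict.ofList config).getD "type" "")) 0
        b.insert p (b.getD p [] ++ [config]))
      PySem.Dict.empty
  -- for p in sorted(buckets, reverse=True): result.extend(buckets[p])
  (PySem.List.sorted buckets.keys (fun k => k) true).foldl
    (fun r p => r ++ buckets.getD p []) []

-- ===== PRECONDITION & SPEC =====
def Spec_optimize_calculation_order_py (indicators_config : List (List (String × String))) (out : List (List (String × String))) : Prop := out = optimize_calculation_order_py_alt indicators_config
instance (indicators_config : List (List (String × String))) (out : List (List (String × String))) : Decidable (Spec_optimize_calculation_order_py indicators_config out) := by unfold Spec_optimize_calculation_order_py; infer_instance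

-- ===== CLAIM (what is proved, stated in full; the proofs are below) =====
def Claim_equal_optimize_calculation_order_py : Prop := ∀ (indicators_config : List (List (String × String))), Dom_optimize_calculation_order_py indicators_config → Spec_optimize_calculation_order_py indicators_config (optimize_calculation_order_py indicators_config)

-- ===== LEMMAS AND PROOFS =====

-- the lowercased type of a config, as both Pythons compute it
def pvTypeOf (config : List (String × String)) : String :=
  PySem.Str.lower ((PySem.Dict.ofList config).getD "type" "")

-- the common priority value both programs assign to a config
def pvPrio (l : List (List (String × String))) (c : List (String × String)) : Int :=
  ((l.map pvTypeOf).countP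
    (fun t => (pvDependencies.getD (pvTypeOf c) []).contains t) : Nat)

-- A's (config, priority) pair list, B's score dict and B's buckets dict (defeq to
-- the corresponding let-bound values inside the two ports)
def pvPairsA (l : List (List (String × String))) : List (List (String × String) × Int) :=
  l.foldl
    (fun acc config =>
      acc ++ [(config,
        ((pvDependencies.getD (pvTypeOf config) []).map
          (fun dep =>
            (l.foldl
                (fun (d : PySem.Dict String Int) c =>
                  d.insert (pvTypeOf c) (d.getD (pvTypeOf c) 0 + 1))
                PySem.Dict.empty).getD dep 0)).sum)]) []

def pvScore (l : List (List (String × String))) : PySem.Dict String Int :=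
  l.foldl
    (fun s config =>
      (pvDependents.getD (pvTypeOf config) []).foldl
        (fun s d => s.insert d (s.getD d 0 + 1)) s)
    PySem.Dict.empty

def pvBuckets (l : List (List (String × String))) :
    PySem.Dict Int (List (List (String × String))) :=
  l.foldl
    (fun b config =>
      b.insert ((pvScore l).getD (pvTypeOf config) 0)
        (b.getD ((pvScore l).getD (pvTypeOf config) 0) [] ++ [config]))
    PySem.Dict.empty

-- ---- facts about the two literal dicts ----
lemma pvDependencies_getD (t : String) : (pvDependencies.getD t []) =
    (if t = "ema" then [] else if t = "sma" then [] else if t = "wma" then []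
     else if t = "dema" then ["ema"] else if t = "tema" then ["ema"] else if t = "macd" then ["ema"]
     else if t = "bollinger_bands" then ["sma"]
     else if t = "rsi" then [] else if t = "stochastic" then [] else if t = "atr" then []
     else if t = "adx" then ["atr"] else if t = "supertrend" then ["atr"] else if t = "trix" then ["ema"]
     else []) := by
  by_cases h1 : t = "ema"; · subst h1; decide
  by_cases h2 : t = "sma"; · subst h2; decide
  by_cases h3 : t = "wma"; · subst h3; decide
  by_cases h4 : t = "dema"; · subst h4; decide
  by_cases h5 : t = "tema"; · subst h5; decide
  by_cases h6 : t = "macd"; · subst h6; decide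
  by_cases h7 : t = "bollinger_bands"; · subst h7; decide
  by_cases h8 : t = "rsi"; · subst h8; decide
  by_cases h9 : t = "stochastic"; · subst h9; decide
  by_cases h10 : t = "atr"; · subst h10; decide
  by_cases h11 : t = "adx"; · subst h11; decide
  by_cases h12 : t = "supertrend"; · subst h12; decide
  by_cases h13 : t = "trix"; · subst h13; decide
  rw [show pvDependencies = PySem.Dict.mk
    [("ema", []), ("sma", []), ("wma", []),
     ("dema", ["ema"]), ("tema", ["ema"]), ("macd", ["ema"]),
     ("bollinger_bands", ["sma"]),
     ("rsi", []), ("stochastic", []), ("atr", []),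
     ("adx", ["atr"]), ("supertrend", ["atr"]), ("trix", ["ema"])] from rfl]
  simp only [PySem.Dict.getD_eq_get?_getD, PySem.Dict.get?_mk_cons,
    beq_eq_false_iff_ne.mpr (Ne.symm h1), beq_eq_false_iff_ne.mpr (Ne.symm h2),
    beq_eq_false_iff_ne.mpr (Ne.symm h3), beq_eq_false_iff_ne.mpr (Ne.symm h4),
    beq_eq_false_iff_ne.mpr (Ne.symm h5), beq_eq_false_iff_ne.mpr (Ne.symm h6),
    beq_eq_false_iff_ne.mpr (Ne.symm h7), beq_eq_false_iff_ne.mpr (Ne.symm h8),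
    beq_eq_false_iff_ne.mpr (Ne.symm h9), beq_eq_false_iff_ne.mpr (Ne.symm h10),
    beq_eq_false_iff_ne.mpr (Ne.symm h11), beq_eq_false_iff_ne.mpr (Ne.symm h12),
    beq_eq_false_iff_ne.mpr (Ne.symm h13),
    if_neg h1, if_neg h2, if_neg h3, if_neg h4, if_neg h5, if_neg h6, if_neg h7,
    if_neg h8, if_neg h9, if_neg h10, if_neg h11, if_neg h12, if_neg h13]
  rfl

lemma pvDependents_getD (u : String) : (pvDependents.getD u []) =
    (if u = "ema" then ["dema","tema","macd","trix"] else if u = "sma" then ["bollinger_bands"]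
     else if u = "atr" then ["adx","supertrend"] else []) := by
  by_cases h1 : u = "ema"; · subst h1; decide
  by_cases h2 : u = "sma"; · subst h2; decide
  by_cases h3 : u = "atr"; · subst h3; decide
  rw [show pvDependents = PySem.Dict.mk
    [("ema", ["dema", "tema", "macd", "trix"]),
     ("sma", ["bollinger_bands"]),
     ("atr", ["adx", "supertrend"])] from rfl]
  simp only [PySem.Dict.getD_eq_get?_getD, PySem.Dict.get?_mk_cons,
    beq_eq_false_iff_ne.mpr (Ne.symm h1), beq_eq_false_iff_ne.mpr (Ne.symm h2),
    beq_eq_false_iff_ne.mpr (Ne.symm h3), if_neg h1, if_neg h2, if_neg h3]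
  rfl

lemma pvDeps_nodup (t : String) : (pvDependencies.getD t []).Nodup := by
  rw [pvDependencies_getD]
  by_cases k1 : t = "ema"
  · subst k1; decide
  by_cases k2 : t = "sma"
  · subst k2; decide
  by_cases k3 : t = "wma"
  · subst k3; decide
  by_cases k4 : t = "dema"
  · subst k4; decide
  by_cases k5 : t = "tema"
  · subst k5; decide
  by_cases k6 : t = "macd"
  · subst k6; decide
  by_cases k7 : t = "bollinger_bands"
  · subst k7; decide
  by_cases k8 : t = "rsi"
  · subst k8; decide
  by_cases k9 : t = "stochastic"
  · subst k9; decide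
  by_cases k10 : t = "atr"
  · subst k10; decide
  by_cases k11 : t = "adx"
  · subst k11; decide
  by_cases k12 : t = "supertrend"
  · subst k12; decide
  by_cases k13 : t = "trix"
  · subst k13; decide
  simp only [if_neg k1, if_neg k2, if_neg k3, if_neg k4, if_neg k5, if_neg k6, if_neg k7, if_neg k8, if_neg k9, if_neg k10, if_neg k11, if_neg k12, if_neg k13]
  decide

lemma pvDependents_nodup (u : String) : (pvDependents.getD u []).Nodup := by
  rw [pvDependents_getD]
  by_cases h1 : u = "ema"
  · subst h1; decide
  by_cases h2 : u = "sma"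
  · subst h2; decide
  by_cases h3 : u = "atr"
  · subst h3; decide
  simp only [if_neg h1, if_neg h2, if_neg h3]
  decide

set_option maxHeartbeats 2000000 in
lemma pv_inv (t u : String) :
    (pvDependents.getD u []).contains t = (pvDependencies.getD t []).contains u := by
  rw [pvDependents_getD, pvDependencies_getD]
  by_cases hu1 : u = "ema"
  · subst hu1
    rw [if_pos rfl]
    by_cases k1 : t = "ema"
    · subst k1; decide
    by_cases k2 : t = "sma"
    · subst k2; decide
    by_cases k3 : t = "wma"
    · subst k3; decide
    by_cases k4 : t = "dema"
    · subst k4; decide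
    by_cases k5 : t = "tema"
    · subst k5; decide
    by_cases k6 : t = "macd"
    · subst k6; decide
    by_cases k7 : t = "bollinger_bands"
    · subst k7; decide
    by_cases k8 : t = "rsi"
    · subst k8; decide
    by_cases k9 : t = "stochastic"
    · subst k9; decide
    by_cases k10 : t = "atr"
    · subst k10; decide
    by_cases k11 : t = "adx"
    · subst k11; decide
    by_cases k12 : t = "supertrend"
    · subst k12; decide
    by_cases k13 : t = "trix"
    · subst k13; decide
    simp only [if_neg k1, if_neg k2, if_neg k3, if_neg k4, if_neg k5, if_neg k6, if_neg k7, if_neg k8, if_neg k9, if_neg k10, if_neg k11, if_neg k12, if_neg k13, List.contains_cons, List.contains_nil, beq_eq_false_iff_ne.mpr k4, beq_eq_false_iff_ne.mpr k5, beq_eq_false_iff_ne.mpr k6, beq_eq_false_iff_ne.mpr k13, Bool.or_false]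
  by_cases hu2 : u = "sma"
  · subst hu2
    rw [if_neg (by decide), if_pos rfl]
    by_cases k1 : t = "ema"
    · subst k1; decide
    by_cases k2 : t = "sma"
    · subst k2; decide
    by_cases k3 : t = "wma"
    · subst k3; decide
    by_cases k4 : t = "dema"
    · subst k4; decide
    by_cases k5 : t = "tema"
    · subst k5; decide
    by_cases k6 : t = "macd"
    · subst k6; decide
    by_cases k7 : t = "bollinger_bands"
    · subst k7; decide
    by_cases k8 : t = "rsi"
    · subst k8; decide
    by_cases k9 : t = "stochastic"
    · subst k9; decide
    by_cases k10 : t = "atr"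
    · subst k10; decide
    by_cases k11 : t = "adx"
    · subst k11; decide
    by_cases k12 : t = "supertrend"
    · subst k12; decide
    by_cases k13 : t = "trix"
    · subst k13; decide
    simp only [if_neg k1, if_neg k2, if_neg k3, if_neg k4, if_neg k5, if_neg k6, if_neg k7, if_neg k8, if_neg k9, if_neg k10, if_neg k11, if_neg k12, if_neg k13, List.contains_cons, List.contains_nil, beq_eq_false_iff_ne.mpr k7, Bool.or_false]
  by_cases hu3 : u = "atr"
  · subst hu3
    rw [if_neg (by decide), if_neg (by decide), if_pos rfl]
    by_cases k1 : t = "ema"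
    · subst k1; decide
    by_cases k2 : t = "sma"
    · subst k2; decide
    by_cases k3 : t = "wma"
    · subst k3; decide
    by_cases k4 : t = "dema"
    · subst k4; decide
    by_cases k5 : t = "tema"
    · subst k5; decide
    by_cases k6 : t = "macd"
    · subst k6; decide
    by_cases k7 : t = "bollinger_bands"
    · subst k7; decide
    by_cases k8 : t = "rsi"
    · subst k8; decide
    by_cases k9 : t = "stochastic"
    · subst k9; decide
    by_cases k10 : t = "atr"
    · subst k10; decide
    by_cases k11 : t = "adx"
    · subst k11; decide
    by_cases k12 : t = "supertrend"
    · subst k12; decide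
    by_cases k13 : t = "trix"
    · subst k13; decide
    simp only [if_neg k1, if_neg k2, if_neg k3, if_neg k4, if_neg k5, if_neg k6, if_neg k7, if_neg k8, if_neg k9, if_neg k10, if_neg k11, if_neg k12, if_neg k13, List.contains_cons, List.contains_nil, beq_eq_false_iff_ne.mpr k11, beq_eq_false_iff_ne.mpr k12, Bool.or_false]
  rw [if_neg hu1, if_neg hu2, if_neg hu3]
  simp only [List.contains_nil]
  by_cases k1 : t = "ema"
  · subst k1
    rw [if_pos rfl]
    rfl
  by_cases k2 : t = "sma"
  · subst k2
    rw [if_neg (by decide), if_pos rfl]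
    rfl
  by_cases k3 : t = "wma"
  · subst k3
    rw [if_neg (by decide), if_neg (by decide), if_pos rfl]
    rfl
  by_cases k4 : t = "dema"
  · subst k4
    rw [if_neg (by decide), if_neg (by decide), if_neg (by decide), if_pos rfl]
    simp only [List.contains_cons, List.contains_nil, beq_eq_false_iff_ne.mpr hu1, Bool.or_false]
  by_cases k5 : t = "tema"
  · subst k5
    rw [if_neg (by decide), if_neg (by decide), if_neg (by decide), if_neg (by decide), if_pos rfl]
    simp only [List.contains_cons, List.contains_nil, beq_eq_false_iff_ne.mpr hu1, Bool.or_false]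
  by_cases k6 : t = "macd"
  · subst k6
    rw [if_neg (by decide), if_neg (by decide), if_neg (by decide), if_neg (by decide), if_neg (by decide), if_pos rfl]
    simp only [List.contains_cons, List.contains_nil, beq_eq_false_iff_ne.mpr hu1, Bool.or_false]
  by_cases k7 : t = "bollinger_bands"
  · subst k7
    rw [if_neg (by decide), if_neg (by decide), if_neg (by decide), if_neg (by decide), if_neg (by decide), if_neg (by decide), if_pos rfl]
    simp only [List.contains_cons, List.contains_nil, beq_eq_false_iff_ne.mpr hu2, Bool.or_false]
  by_cases k8 : t = "rsi"
  · subst k8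
    rw [if_neg (by decide), if_neg (by decide), if_neg (by decide), if_neg (by decide), if_neg (by decide), if_neg (by decide), if_neg (by decide), if_pos rfl]
    rfl
  by_cases k9 : t = "stochastic"
  · subst k9
    rw [if_neg (by decide), if_neg (by decide), if_neg (by decide), if_neg (by decide), if_neg (by decide), if_neg (by decide), if_neg (by decide), if_neg (by decide), if_pos rfl]
    rfl
  by_cases k10 : t = "atr"
  · subst k10
    rw [if_neg (by decide), if_neg (by decide), if_neg (by decide), if_neg (by decide), if_neg (by decide), if_neg (by decide), if_neg (by decide), if_neg (by decide), if_neg (by decide), if_pos rfl]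
    rfl
  by_cases k11 : t = "adx"
  · subst k11
    rw [if_neg (by decide), if_neg (by decide), if_neg (by decide), if_neg (by decide), if_neg (by decide), if_neg (by decide), if_neg (by decide), if_neg (by decide), if_neg (by decide), if_neg (by decide), if_pos rfl]
    simp only [List.contains_cons, List.contains_nil, beq_eq_false_iff_ne.mpr hu3, Bool.or_false]
  by_cases k12 : t = "supertrend"
  · subst k12
    rw [if_neg (by decide), if_neg (by decide), if_neg (by decide), if_neg (by decide), if_neg (by decide), if_neg (by decide), if_neg (by decide), if_neg (by decide), if_neg (by decide), if_neg (by decide), if_neg (by decide), if_pos rfl]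
    simp only [List.contains_cons, List.contains_nil, beq_eq_false_iff_ne.mpr hu3, Bool.or_false]
  by_cases k13 : t = "trix"
  · subst k13
    rw [if_neg (by decide), if_neg (by decide), if_neg (by decide), if_neg (by decide), if_neg (by decide), if_neg (by decide), if_neg (by decide), if_neg (by decide), if_neg (by decide), if_neg (by decide), if_neg (by decide), if_neg (by decide), if_pos rfl]
    simp only [List.contains_cons, List.contains_nil, beq_eq_false_iff_ne.mpr hu1, Bool.or_false]
  simp only [if_neg k1, if_neg k2, if_neg k3, if_neg k4, if_neg k5, if_neg k6, if_neg k7, if_neg k8, if_neg k9, if_neg k10, if_neg k11, if_neg k12, if_neg k13]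
  rfl

lemma pv_insertBy_nil {α : Type} (before : α → α → Bool) (x : α) :
    PySem.List.insertBy before x [] = [x] := rfl

lemma pv_insertBy_cons {α : Type} (before : α → α → Bool) (x y : α) (ys : List α) :
    PySem.List.insertBy before x (y :: ys)
      = if before x y then x :: y :: ys else y :: PySem.List.insertBy before x ys := rfl

lemma pv_insertBy_append {α : Type} (before : α → α → Bool) (x : α) (as bs : List α)
    (h : ∀ y ∈ as, before x y = false) :
    PySem.List.insertBy before x (as ++ bs) = as ++ PySem.List.insertBy before x bs := by
  induction as with
  | nil => simp
  | cons a as ih =>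
    have ha := h a (List.mem_cons_self)
    simp only [List.cons_append, pv_insertBy_cons, ha, Bool.false_eq_true, if_false]
    rw [ih (fun y hy => h y (List.mem_cons_of_mem _ hy))]

lemma pv_insertBy_front {α : Type} (before : α → α → Bool) (x : α) (ys : List α)
    (h : ∀ y ∈ ys.head?, before x y = true) :
    PySem.List.insertBy before x ys = x :: ys := by
  cases ys with
  | nil => rfl
  | cons y ys => simp only [pv_insertBy_cons, h y rfl, if_true]

lemma pv_insertBy_map {α β : Type} (g : α → β) (key : β → Int) (x : α) (ys : List α) :
    PySem.List.insertBy (fun a b => decide (key b < key a)) (g x) (ys.map g)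
      = (PySem.List.insertBy (fun a b => decide (key (g b) < key (g a))) x ys).map g := by
  induction ys with
  | nil => rfl
  | cons y ys ih =>
    simp only [List.map_cons, pv_insertBy_cons]
    by_cases h : key (g y) < key (g x) <;> simp [h, ih]

lemma pv_sorted_map {α β : Type} (g : α → β) (key : β → Int) (l : List α) :
    PySem.List.sorted (l.map g) key true
      = (PySem.List.sorted l (fun a => key (g a)) true).map g := by
  rw [PySem.List.sorted_rev_eq_foldl_insertBy, PySem.List.sorted_rev_eq_foldl_insertBy]
  rw [List.foldl_map]
  induction l using List.reverseRecOn with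
  | nil => rfl
  | append_singleton l x ih =>
    rw [List.foldl_append, List.foldl_append]
    simp only [List.foldl_cons, List.foldl_nil]
    rw [ih, pv_insertBy_map]

lemma pv_ins_flat_mem {α : Type} (P : α → Int) (x : α) (ks : List Int)
    (f : Int → List α)
    (hks : ks.Pairwise (· > ·))
    (hf : ∀ p ∈ ks, ∀ y ∈ f p, P y = p)
    (hne : ∀ p ∈ ks, f p ≠ [])
    (hx : P x ∈ ks) :
    PySem.List.insertBy (fun a b => decide (P b < P a)) x (ks.flatMap f)
      = ks.flatMap (fun p => if p = P x then f p ++ [x] else f p) := by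
  induction ks with
  | nil => cases hx
  | cons k ks ih =>
    rcases List.pairwise_cons.mp hks with ⟨hk, hks'⟩
    by_cases hkx : k = P x
    · -- x's bucket is the first one: skip f k, then insert in front of the rest
      subst hkx
      have h1 : ∀ y ∈ f (P x), (fun a b => decide (P b < P a)) x y = false := by
        intro y hy
        have := hf (P x) List.mem_cons_self y hy
        simp [this]
      rw [List.flatMap_cons, pv_insertBy_append _ _ _ _ h1]
      have h2 : PySem.List.insertBy (fun a b => decide (P b < P a)) x (ks.flatMap f)
          = x :: ks.flatMap f := by
        apply pv_insertBy_front
        intro y hy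
        cases hys : ks.flatMap f with
        | nil => simp [hys] at hy
        | cons z zs =>
          rw [hys] at hy
          simp only [List.head?_cons, Option.mem_some_iff] at hy
          subst hy
          have hz : z ∈ ks.flatMap f := by rw [hys]; exact List.mem_cons_self
          rcases List.mem_flatMap.mp hz with ⟨p, hp, hzp⟩
          have := hf p (List.mem_cons_of_mem _ hp) z hzp
          have hlt : p < P x := hk p hp
          simp [this, hlt]
      rw [h2, List.flatMap_cons, if_pos rfl]
      have h3 : ks.flatMap (fun p => if p = P x then f p ++ [x] else f p) = ks.flatMap f := by
        apply List.flatMap_congr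
        intro p hp
        have : p ≠ P x := by have := hk p hp; omega
        simp [this]
      rw [h3]
      simp
    · -- x belongs further right: skip the whole first bucket
      have hx' : P x ∈ ks := by
        rcases List.mem_cons.mp hx with h | h
        · exact absurd h.symm hkx
        · exact h
      have h1 : ∀ y ∈ f k, (fun a b => decide (P b < P a)) x y = false := by
        intro y hy
        have hyk := hf k List.mem_cons_self y hy
        have : k > P x := hk (P x) hx'
        simp [hyk]; omega
      rw [List.flatMap_cons, pv_insertBy_append _ _ _ _ h1,
        ih hks' (fun p hp => hf p (List.mem_cons_of_mem _ hp))
          (fun p hp => hne p (List.mem_cons_of_mem _ hp)) hx',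
        List.flatMap_cons, if_neg hkx]

lemma pv_ins_flat_new {α : Type} (P : α → Int) (x : α) (ks : List Int)
    (f : Int → List α)
    (hks : ks.Pairwise (· > ·))
    (hf : ∀ p ∈ ks, ∀ y ∈ f p, P y = p)
    (hne : ∀ p ∈ ks, f p ≠ [])
    (hx : P x ∉ ks)
    (hx0 : f (P x) = []) :
    PySem.List.insertBy (fun a b => decide (P b < P a)) x (ks.flatMap f)
      = (PySem.List.insertBy (fun a b : Int => decide (b < a)) (P x) ks).flatMap
          (fun p => if p = P x then f p ++ [x] else f p) := by
  induction ks with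
  | nil =>
    simp [pv_insertBy_nil, List.flatMap_cons, hx0]
  | cons k ks ih =>
    rcases List.pairwise_cons.mp hks with ⟨hk, hks'⟩
    have hkx : k ≠ P x := fun h => hx (h ▸ List.mem_cons_self)
    by_cases hlt : k < P x
    · -- new bucket goes in front of everything
      rw [pv_insertBy_cons, if_pos (by simpa using hlt)]
      have hfront : PySem.List.insertBy (fun a b => decide (P b < P a)) x ((k :: ks).flatMap f)
          = x :: (k :: ks).flatMap f := by
        apply pv_insertBy_front
        intro y hy
        cases hys : (k :: ks).flatMap f with
        | nil => simp [hys] at hy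
        | cons z zs =>
          rw [hys] at hy
          simp only [List.head?_cons, Option.mem_some_iff] at hy
          subst hy
          have hz : z ∈ (k :: ks).flatMap f := by rw [hys]; exact List.mem_cons_self
          rcases List.mem_flatMap.mp hz with ⟨p, hp, hzp⟩
          have hzpp := hf p hp z hzp
          have hplt : p < P x := by
            rcases List.mem_cons.mp hp with h | h
            · omega
            · have := hk p h; omega
          simp [hzpp, hplt]
      rw [hfront]
      conv_rhs => rw [List.flatMap_cons]
      rw [if_pos rfl, hx0]
      have : (k :: ks).flatMap (fun p => if p = P x then f p ++ [x] else f p)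
          = (k :: ks).flatMap f := by
        apply List.flatMap_congr
        intro p hp
        have : p ≠ P x := by
          rcases List.mem_cons.mp hp with h | h
          · exact h ▸ hkx
          · have := hk p h; omega
        simp [this]
      rw [this]
      simp
    · -- k > P x: skip bucket k
      have hgt : P x < k := by omega
      have h1 : ∀ y ∈ f k, (fun a b => decide (P b < P a)) x y = false := by
        intro y hy
        have := hf k List.mem_cons_self y hy
        simp [this]; omega
      rw [List.flatMap_cons, pv_insertBy_append _ _ _ _ h1,
        ih hks' (fun p hp => hf p (List.mem_cons_of_mem _ hp))
          (fun p hp => hne p (List.mem_cons_of_mem _ hp))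
          (fun h => hx (List.mem_cons_of_mem _ h)),
        pv_insertBy_cons, if_neg (by simpa using hlt)]
      rw [List.flatMap_cons, if_neg hkx]

lemma pv_dedup_snoc {α : Type} [BEq α] [LawfulBEq α] (l : List α) (a : α) :
    PySem.List.dedup (l ++ [a])
      = if a ∈ l then PySem.List.dedup l else PySem.List.dedup l ++ [a] := by
  show PySem.Set.ofList (l ++ [a]) = _
  unfold PySem.Set.ofList
  rw [List.foldl_append]
  simp only [List.foldl_cons, List.foldl_nil]
  rw [show List.foldl PySem.Set.add PySem.Set.empty l = PySem.Set.ofList l from rfl]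
  unfold PySem.Set.add
  have hc : ((PySem.Set.ofList l).contains a = true) ↔ a ∈ l := by
    simp [PySem.Set.mem_ofList]
  by_cases h : a ∈ l
  · rw [if_pos (hc.mpr h), if_pos h]; rfl
  · rw [if_neg (fun hh => h (hc.mp hh)), if_neg h]; rfl
  
lemma pv_ks_pairwise (xs : List Int) :
    (PySem.List.sorted (PySem.List.dedup xs) (fun k => k) true).Pairwise (· > ·) := by
  have hnd : (PySem.List.sorted (PySem.List.dedup xs) (fun k => k) true).Nodup :=
    (PySem.List.sorted_perm _ _ _).nodup_iff.mpr (PySem.List.nodup_dedup xs)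
  have hle := PySem.List.sorted_pairwise_rev (PySem.List.dedup xs) (fun k => k)
  have := List.Pairwise.and hle hnd
  exact this.imp (fun h => by obtain ⟨h1, h2⟩ := h; omega)

lemma pv_sorted_rev_eq_buckets {α : Type} (P : α → Int) (l : List α) :
    PySem.List.sorted l P true
      = (PySem.List.sorted (PySem.List.dedup (l.map P)) (fun k => k) true).flatMap
          (fun p => l.filter (fun c => P c == p)) := by
  induction l using List.reverseRecOn with
  | nil => rfl
  | append_singleton l x ih =>
    have hsnoc : PySem.List.sorted (l ++ [x]) P true
        = PySem.List.insertBy (fun a b => decide (P b < P a)) x (PySem.List.sorted l P true) := by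
      rw [PySem.List.sorted_rev_eq_foldl_insertBy, PySem.List.sorted_rev_eq_foldl_insertBy,
        List.foldl_append]
      simp
    rw [hsnoc, ih]
    set ks := PySem.List.sorted (PySem.List.dedup (l.map P)) (fun k => k) true with hks
    have hpair : ks.Pairwise (· > ·) := pv_ks_pairwise _
    have hf : ∀ p ∈ ks, ∀ y ∈ l.filter (fun c => P c == p), P y = p := by
      intro p _ y hy
      have := (List.mem_filter.mp hy).2
      simpa using this
    have hne : ∀ p ∈ ks, l.filter (fun c => P c == p) ≠ [] := by
      intro p hp
      have hpd : p ∈ PySem.List.dedup (l.map P) := (PySem.List.mem_sorted _ _ _ _).mp hp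
      have hpm : p ∈ l.map P := (PySem.List.mem_dedup _ _).mp hpd
      rcases List.mem_map.mp hpm with ⟨c, hc, hcp⟩
      exact List.ne_nil_of_mem (List.mem_filter.mpr ⟨hc, by simp [hcp]⟩)
    have hfilter_snoc : ∀ p, (l ++ [x]).filter (fun c => P c == p)
        = l.filter (fun c => P c == p) ++ (if P x == p then [x] else []) := by
      intro p
      rw [List.filter_append]
      congr 1
      simp [List.filter_singleton]
    by_cases hmem : P x ∈ l.map P
    · have hxks : P x ∈ ks := (PySem.List.mem_sorted _ _ _ _).mpr ((PySem.List.mem_dedup _ _).mpr hmem)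
      rw [pv_ins_flat_mem P x ks _ hpair hf hne hxks]
      have hkeys : PySem.List.dedup ((l ++ [x]).map P) = PySem.List.dedup (l.map P) := by
        rw [List.map_append, List.map_singleton, pv_dedup_snoc,
          if_pos hmem]
      rw [hkeys, ← hks]
      apply List.flatMap_congr
      intro p hp
      rw [hfilter_snoc p]
      by_cases hpx : p = P x
      · subst hpx; simp
      · have : (P x == p) = false := by simp; exact fun h => hpx h.symm
        simp [hpx, this]
    · have hxks : P x ∉ ks := fun h =>
        hmem ((PySem.List.mem_dedup _ _).mp ((PySem.List.mem_sorted _ _ _ _).mp h))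
      have hx0 : l.filter (fun c => P c == P x) = [] := by
        rw [List.filter_eq_nil_iff]
        intro c hc
        simp only [beq_iff_eq]
        exact fun h => hmem (h ▸ List.mem_map_of_mem hc)
      rw [pv_ins_flat_new P x ks _ hpair hf hne hxks hx0]
      have hkeys : PySem.List.sorted (PySem.List.dedup ((l ++ [x]).map P)) (fun k => k) true
          = PySem.List.insertBy (fun a b : Int => decide (b < a)) (P x) ks := by
        rw [List.map_append, List.map_singleton, pv_dedup_snoc,
          if_neg hmem]
        rw [PySem.List.sorted_rev_eq_foldl_insertBy, List.foldl_append]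
        simp only [List.foldl_cons, List.foldl_nil]
        rw [hks, PySem.List.sorted_rev_eq_foldl_insertBy]
      rw [hkeys]
      apply List.flatMap_congr
      intro p hp
      rw [hfilter_snoc p]
      by_cases hpx : p = P x
      · subst hpx; simp [hx0]
      · have : (P x == p) = false := by simp; exact fun h => hpx h.symm
        simp [hpx, this]

-- count of t in a duplicate-free list is a membership test
lemma pv_count_nodup {α : Type} [BEq α] [LawfulBEq α] (ds : List α) (h : ds.Nodup) (t : α) :
    ds.count t = if t ∈ ds then 1 else 0 := by
  by_cases hm : t ∈ ds
  · rw [if_pos hm]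
    have h1 : ds.count t ≤ 1 := List.nodup_iff_count_le_one.mp h t
    have h2 : 0 < ds.count t := List.count_pos_iff.mpr hm
    omega
  · rw [if_neg hm, List.count_eq_zero]
    exact hm

lemma pv_score_getD_aux (deps : String → List String) (hnd : ∀ u, (deps u).Nodup)
    (l : List (List (String × String))) (s : PySem.Dict String Int) (t : String) :
    (l.foldl
        (fun s config => (deps (pvTypeOf config)).foldl
            (fun s d => s.insert d (s.getD d 0 + 1)) s) s).getD t 0
      = s.getD t 0 + (l.countP (fun o => (deps (pvTypeOf o)).contains t) : Nat) := by
  induction l generalizing s with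
  | nil => simp
  | cons c l ih =>
    rw [List.foldl_cons, ih]
    rw [PySem.Dict.getD_foldl_insert_add_one]
    rw [pv_count_nodup _ (hnd (pvTypeOf c)) t]
    rw [List.countP_cons]
    have : ((deps (pvTypeOf c)).contains t = true) ↔ t ∈ deps (pvTypeOf c) := by
      simp
    by_cases hm : t ∈ deps (pvTypeOf c)
    · rw [if_pos hm, if_pos (by simpa [this] using hm)]
      push_cast
      ring
    · rw [if_neg hm, if_neg (by simpa [this] using hm)]
      push_cast
      ring

-- B's bucket dict: keys are the distinct priorities in first-occurrence order
lemma pv_buckets_keys {α : Type} (P : α → Int) (l : List α) :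
    (l.foldl
        (fun (b : PySem.Dict Int (List α)) config =>
          b.insert (P config) (b.getD (P config) [] ++ [config]))
        PySem.Dict.empty).keys
      = PySem.List.dedup (l.map P) := by
  rw [PySem.Dict.keys_foldl_insert_key l P (fun b x => b.getD (P x) [] ++ [x]) PySem.Dict.empty]
  rfl

-- B's bucket dict: each bucket is the filter of its priority
lemma pv_buckets_getD {α : Type} (P : α → Int) (l : List α) (p : Int) :
    (l.foldl
        (fun (b : PySem.Dict Int (List α)) config =>
          b.insert (P config) (b.getD (P config) [] ++ [config]))
        PySem.Dict.empty).getD p []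
      = l.filter (fun c => P c == p) := by
  have h1 : (l.foldl
        (fun (b : PySem.Dict Int (List α)) config =>
          b.insert (P config) (b.getD (P config) [] ++ [config]))
        PySem.Dict.empty)
      = (l.map (fun c => (P c, c))).foldl
          (fun d pr => d.modify pr.1 [] (fun v => v ++ [pr.2])) PySem.Dict.empty := by
    rw [List.foldl_map]
    rfl
  rw [h1, PySem.Dict.getD_foldl_modify_append]
  rw [List.filter_map, List.map_map]
  have : (fun pr : Int × α => pr.1 == p) ∘ (fun c => (P c, c)) = fun c => P c == p := rfl
  rw [this]
  have h3 : ∀ xs : List α, xs.map ((fun x : Int × α => x.2) ∘ fun c : α => (P c, c)) = xs := by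
    intro xs
    induction xs with
    | nil => rfl
    | cons a xs ih => simp only [List.map_cons, Function.comp_apply, ih]
  rw [h3, PySem.Dict.getD_empty, List.nil_append]

-- ---- A-side: a 0/1 sum over a duplicate-free list collapses to a membership test ----
lemma pv_sum_ite_eq_ite_mem (x : String) (ds : List String) (h : ds.Nodup) :
    ((ds.map (fun dep => if dep == x then (1:Int) else 0)).sum)
      = (if ds.contains x then (1:Int) else 0) := by
  induction ds with
  | nil => simp
  | cons d ds ih =>
    rcases List.nodup_cons.mp h with ⟨hd, hds⟩
    simp only [List.map_cons, List.sum_cons, ih hds]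
    by_cases hx : d = x
    · subst hx
      simp [hd]
    · have h1 : (d == x) = false := beq_eq_false_iff_ne.mpr hx
      have h2 : ¬ x = d := fun hh => hx hh.symm
      simp [h1, h2]

-- sum of per-dependency counts = one counting scan (for duplicate-free deps)
lemma pv_sum_count_eq_countP (ds : List String) (h : ds.Nodup) (types : List String) :
    ((ds.map (fun dep => (types.count dep : Int))).sum)
      = (types.countP (fun x => ds.contains x) : Int) := by
  induction types with
  | nil => simp
  | cons x ts ih =>
    have hcount : ∀ dep : String, ((x :: ts).count dep : Int)
        = (ts.count dep : Int) + (if dep == x then (1:Int) else 0) := by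
      intro dep
      by_cases hx : dep = x <;> simp [hx, Ne.symm]
    simp only [hcount]
    rw [List.sum_map_add]
    rw [ih, pv_sum_ite_eq_ite_mem x ds h, List.countP_cons]
    cases ds.contains x <;> simp

-- the priority A computes for a config is pvPrio
lemma pv_priority_A (l : List (List (String × String))) (c : List (String × String)) :
    ((pvDependencies.getD (pvTypeOf c) []).map
        (fun dep =>
          (l.foldl
              (fun (d : PySem.Dict String Int) x =>
                d.insert (pvTypeOf x) (d.getD (pvTypeOf x) 0 + 1))
              PySem.Dict.empty).getD dep 0)).sum
      = pvPrio l c := by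
  have hcount : ∀ dep : String,
      (l.foldl
          (fun (d : PySem.Dict String Int) x =>
            d.insert (pvTypeOf x) (d.getD (pvTypeOf x) 0 + 1))
          PySem.Dict.empty).getD dep 0
        = ((l.map pvTypeOf).count dep : Int) := by
    intro dep
    have h1 : l.foldl
          (fun (d : PySem.Dict String Int) x =>
            d.insert (pvTypeOf x) (d.getD (pvTypeOf x) 0 + 1))
          PySem.Dict.empty
        = (l.map pvTypeOf).foldl
            (fun d t => d.insert t (d.getD t 0 + 1)) PySem.Dict.empty := by
      rw [List.foldl_map]
    rw [h1, PySem.Dict.getD_foldl_insert_add_one, PySem.Dict.getD_empty, zero_add]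
  calc ((pvDependencies.getD (pvTypeOf c) []).map
          (fun dep =>
            (l.foldl
                (fun (d : PySem.Dict String Int) x =>
                  d.insert (pvTypeOf x) (d.getD (pvTypeOf x) 0 + 1))
                PySem.Dict.empty).getD dep 0)).sum
      = ((pvDependencies.getD (pvTypeOf c) []).map
          (fun dep => (((l.map pvTypeOf).count dep : Nat) : Int))).sum :=
        congrArg List.sum (List.map_congr_left (fun dep _ => hcount dep))
    _ = pvPrio l c :=
        pv_sum_count_eq_countP _ (pvDeps_nodup (pvTypeOf c)) _

-- A's pair list is the configs tagged with pvPrio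
lemma pv_pairs_A (l : List (List (String × String))) :
    pvPairsA l = l.map (fun config => (config, pvPrio l config)) := by
  unfold pvPairsA
  rw [PySem.List.foldl_append_singleton_eq_map
      (fun config => (config,
        ((pvDependencies.getD (pvTypeOf config) []).map
          (fun dep =>
            (l.foldl
                (fun (d : PySem.Dict String Int) c =>
                  d.insert (pvTypeOf c) (d.getD (pvTypeOf c) 0 + 1))
                PySem.Dict.empty).getD dep 0)).sum)) l []]
  rw [List.nil_append]
  exact List.map_congr_left
    (fun config _ => congrArg (fun p => (config, p)) (pv_priority_A l config))

-- B's score dict agrees with pvPrio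
lemma pv_score_eq_prio (l : List (List (String × String))) (c : List (String × String)) :
    (pvScore l).getD (pvTypeOf c) 0 = pvPrio l c := by
  unfold pvScore
  rw [pv_score_getD_aux (fun u => pvDependents.getD u []) pvDependents_nodup l
      PySem.Dict.empty (pvTypeOf c), PySem.Dict.getD_empty, zero_add]
  have hinv : l.countP (fun o => (pvDependents.getD (pvTypeOf o) []).contains (pvTypeOf c))
      = l.countP (fun o => (pvDependencies.getD (pvTypeOf c) []).contains (pvTypeOf o)) := by
    apply List.countP_congr
    intro o _
    rw [pv_inv (pvTypeOf c) (pvTypeOf o)]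
  rw [hinv]
  unfold pvPrio
  rw [List.countP_map]
  rfl

-- ---- assembling the equivalence ----
lemma pv_main (l : List (List (String × String))) :
    (PySem.List.sorted (pvPairsA l) (fun x => x.2) true).map (fun x => x.1)
      = (PySem.List.sorted (pvBuckets l).keys (fun k => k) true).foldl
          (fun r p => r ++ (pvBuckets l).getD p []) [] := by
  -- A's side: drop the tagging and sort the configs directly
  have hA : (PySem.List.sorted (pvPairsA l) (fun x => x.2) true).map (fun x => x.1)
      = PySem.List.sorted l (fun c => pvPrio l c) true := by
    rw [pv_pairs_A, pv_sorted_map (fun config => (config, pvPrio l config)) (fun x => x.2) l,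
      List.map_map]
    have h1 : ((fun x : List (String × String) × Int => x.1) ∘
        fun config => (config, pvPrio l config)) = id := rfl
    have h2 : (fun a => (fun x : List (String × String) × Int => x.2)
        ((fun config => (config, pvPrio l config)) a)) = fun c => pvPrio l c := rfl
    rw [h1, List.map_id]
  -- B's side: buckets in descending key order
  have hkeys : (pvBuckets l).keys = PySem.List.dedup (l.map (fun c => pvPrio l c)) := by
    unfold pvBuckets
    rw [pv_buckets_keys (fun c => (pvScore l).getD (pvTypeOf c) 0) l]
    congr 1
    exact List.map_congr_left (fun c _ => pv_score_eq_prio l c)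
  have hgetD : ∀ p, (pvBuckets l).getD p [] = l.filter (fun c => pvPrio l c == p) := by
    intro p
    unfold pvBuckets
    rw [pv_buckets_getD (fun c => (pvScore l).getD (pvTypeOf c) 0) l p]
    exact List.filter_congr (fun c _ => by rw [pv_score_eq_prio l c])
  rw [hA, pv_sorted_rev_eq_buckets (fun c => pvPrio l c) l]
  rw [PySem.List.foldl_append_eq_flatMap ((pvBuckets l).getD · []) _ []]
  rw [List.nil_append, hkeys]
  exact (List.flatMap_congr (fun p _ => hgetD p)).symm

-- ===== VERDICT (by name: the statement is the Claim_ definition above) =====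
theorem optimize_calculation_order_py_spec : Claim_equal_optimize_calculation_order_py := by
  intro l _
  unfold Spec_optimize_calculation_order_py
  exact pv_main l
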